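-- pv_equiv track=rewrite | github.com/demo2327/MillerPic | backend/src/handlers/patch_photo.py | _sanitize_subjects
-- ===== SOURCE A (Python) =====
-- MAX_SUBJECTS = 50
--
-- def _sanitize_subjects(subjects):
--     """Sanitize subjects list: trim, dedupe, limit count."""
--     if not isinstance(subjects, list):
--         return None
--
--     # Trim and filter empty strings
--     trimmed = []
--     for s in subjects:
--         if not isinstance(s, str):
--             return None
--         cleaned = s.strip()
--         if cleaned:
--             trimmed.append(cleaned)
--
--     # Remove duplicates while preserving order
--     seen = set()
--     deduplicated = []
--     for item in trimmed:
--         if item not in seen: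
--             seen.add(item)
--             deduplicated.append(item)
--
--     # Limit count
--     if len(deduplicated) > MAX_SUBJECTS:
--         deduplicated = deduplicated[:MAX_SUBJECTS]
--
--     return deduplicated
-- ===== SOURCE B (Python) =====
-- MAX_SUBJECTS = 50
--
-- def _sanitize_subjects(subjects):
--     """Validate, strip, then sieve-dedupe: repeatedly emit the head and filter
--     every later copy of it out of the rest, stopping once the cap is reached."""
--     if not isinstance(subjects, list):
--         return None
--     if any(not isinstance(s, str) for s in subjects):
--         return None
--     rest = [c for s in subjects if (c := s.strip())]
--     out = []
--     while rest and len(out) < MAX_SUBJECTS: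
--         head = rest[0]
--         out.append(head)
--         rest = [x for x in rest[1:] if x != head]
--     return out
-- ===== Notes on version B (the rewrite author's own statement) =====
-- stated objective: alternative
-- what changed: B replaces A's seen-set dedupe followed by a conditional cap with a sieve: after a separate validation pass and strip/filter comprehension it repeatedly emits the current head and filters all its later copies out of the remaining list, stopping as soon as 50 subjects are emitted (no set, no post-hoc slice).
import Mathlib
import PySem

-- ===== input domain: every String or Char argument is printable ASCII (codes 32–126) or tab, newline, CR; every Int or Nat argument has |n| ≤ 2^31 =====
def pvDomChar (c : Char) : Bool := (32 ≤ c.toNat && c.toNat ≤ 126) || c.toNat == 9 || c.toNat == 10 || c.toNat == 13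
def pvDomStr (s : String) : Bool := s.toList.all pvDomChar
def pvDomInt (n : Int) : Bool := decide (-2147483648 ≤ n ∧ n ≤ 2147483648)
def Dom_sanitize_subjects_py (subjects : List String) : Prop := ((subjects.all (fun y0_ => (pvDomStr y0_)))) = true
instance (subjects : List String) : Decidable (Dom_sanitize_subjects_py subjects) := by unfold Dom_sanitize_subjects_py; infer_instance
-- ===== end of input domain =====

-- B replaces A's seen-set dedupe + conditional cap with a head-and-filter sieve that stops at the
-- cap; objective: alternative. The isinstance guards of both Pythons are vacuous under the
-- List String typing, so both ports always return `some`.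

-- ===== PORT A =====
-- three phases, literally: trimmed-list loop, dedupe loop with a seen-set, conditional cap
def sanitize_subjects_py (subjects : List String) : Option (List String) :=
  let trimmed := subjects.foldl (fun acc s =>
      let cleaned := PySem.Str.strip s
      if cleaned ≠ "" then acc ++ [cleaned] else acc) []
  let sd := trimmed.foldl (fun (p : PySem.Set String × List String) item =>
      if ¬ (PySem.Set.contains p.1 item = true) then (PySem.Set.add p.1 item, p.2 ++ [item]) else p)
      (PySem.Set.empty, [])
  let deduplicated := sd.2
  let deduplicated := if (deduplicated.length : Int) > 50
      then PySem.List.slice deduplicated none (some (50 : Int)) else deduplicated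
  some deduplicated

-- ===== PORT B =====
-- B's while loop: emit the head, filter its copies out of the rest, stop at 50 emitted
def pvSieve (rest out : List String) : List String :=
  match rest with
  | [] => out
  | head :: t =>
      if out.length < 50 then pvSieve (t.filter (fun x => x ≠ head)) (out ++ [head]) else out
termination_by rest.length
decreasing_by
  simp only [List.length_unattach]
  exact Nat.lt_succ_of_le (le_trans (List.length_filter_le _ _) (by simp))

def sanitize_subjects_py_alt (subjects : List String) : Option (List String) :=
  -- the validation pass `any(not isinstance(s, str) …)` is vacuous under List String
  let rest := (subjects.map PySem.Str.strip).filter (fun c => c ≠ "")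
  some (pvSieve rest [])

-- ===== PRECONDITION & SPEC =====
def Spec_sanitize_subjects_py (subjects : List String) (out : Option (List String)) : Prop := out = sanitize_subjects_py_alt subjects
instance (subjects : List String) (out : Option (List String)) : Decidable (Spec_sanitize_subjects_py subjects out) := by unfold Spec_sanitize_subjects_py; infer_instance

-- ===== CLAIM (what is proved, stated in full; the proofs are below) =====
def Claim_equal_sanitize_subjects_py : Prop := ∀ (subjects : List String), Dom_sanitize_subjects_py subjects → Spec_sanitize_subjects_py subjects (sanitize_subjects_py subjects)

-- ===== LEMMAS AND PROOFS =====

-- first occurrences, in order: closed form of A's dedupe loop, in B's sieve shape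
def pvDedup (l : List String) : List String :=
  match l with
  | [] => []
  | h :: t => h :: pvDedup (t.filter (fun x => x ≠ h))
termination_by l.length
decreasing_by
  simp only [List.length_unattach]
  exact Nat.lt_succ_of_le (le_trans (List.length_filter_le _ _) (by simp))

-- A's first loop in closed form
theorem pvTrim_foldl (l : List String) (acc : List String) :
    l.foldl (fun acc s =>
      let cleaned := PySem.Str.strip s
      if cleaned ≠ "" then acc ++ [cleaned] else acc) acc
    = acc ++ (l.map PySem.Str.strip).filter (fun c => c ≠ "") := by
  induction l generalizing acc with
  | nil => simp
  | cons s t ih =>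
    rw [List.foldl_cons, ih]
    simp only [List.map_cons, List.filter_cons]
    split <;> simp_all

-- A's dedupe loop with seen-set s and accumulator acc, in closed form:
-- it appends the first occurrences of the elements not already in s
theorem pvDedup_foldl (l : List String) (s : PySem.Set String) (acc : List String) :
    (l.foldl (fun (p : PySem.Set String × List String) item =>
      if ¬ (PySem.Set.contains p.1 item = true) then (PySem.Set.add p.1 item, p.2 ++ [item]) else p)
      (s, acc)).2
    = acc ++ pvDedup (l.filter (fun x => !(PySem.Set.contains s x))) := by
  induction hn : l.length using Nat.strong_induction_on generalizing l s acc with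
  | _ n ih =>
    cases l with
    | nil => simp [pvDedup]
    | cons h t =>
      rw [List.foldl_cons]
      by_cases hc : PySem.Set.contains s h = true
      · rw [if_neg (not_not_intro hc)]
        rw [ih t.length (by simp [← hn]) t s acc rfl]
        have hm : h ∈ s := by simpa [PySem.Set.contains_iff] using hc
        simp [hm]
      · have hcf : PySem.Set.contains s h = false := by simpa using hc
        rw [if_pos hc]
        rw [ih t.length (by simp [← hn]) t (PySem.Set.add s h) (acc ++ [h]) rfl]
        have hfilter : t.filter (fun x => !(PySem.Set.contains (PySem.Set.add s h) x))
            = (t.filter (fun x => !(PySem.Set.contains s x))).filter (fun x => x ≠ h) := by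
          rw [List.filter_filter]
          apply List.filter_congr
          intro x _
          by_cases hx : x = h
          · subst hx
            simp [PySem.Set.mem_add]
          · simp [PySem.Set.mem_add, hx]
        rw [hfilter]
        simp only [List.filter_cons, hcf, Bool.not_false, if_true]
        rw [pvDedup]
        simp

-- the sieve computes out ++ the first (50 - |out|) first-occurrences
theorem pvSieve_eq (l out : List String) :
    pvSieve l out = out ++ (pvDedup l).take (50 - out.length) := by
  induction hn : l.length using Nat.strong_induction_on generalizing l out with
  | _ n ih =>
    cases l with
    | nil => simp [pvSieve, pvDedup]
    | cons h t =>
      rw [pvSieve]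
      by_cases hlen : out.length < 50
      · rw [if_pos hlen,
          ih (t.filter (fun x => x ≠ h)).length
            (by simp [← hn]; exact List.length_filter_le _ _) _ _ rfl]
        rw [pvDedup]
        have h1 : 50 - out.length = (50 - (out.length + 1)) + 1 := by omega
        simp [h1, List.take_succ_cons]
      · rw [if_neg hlen]
        have : 50 - out.length = 0 := by omega
        simp [this]

-- dedupe-then-take-50 = pvDedup take 50, handling A's conditional slice
theorem pvA_cap (d : List String) :
    (if (d.length : Int) > 50 then PySem.List.slice d none (some (50 : Int)) else d)
    = d.take 50 := by
  by_cases h : (d.length : Int) > 50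
  · rw [if_pos h, show ((50 : Int)) = ((50 : Nat) : Int) by norm_num,
      PySem.List.slice_to_natCast]
  · rw [if_neg h]
    have : d.length ≤ 50 := by omega
    rw [List.take_of_length_le this]

-- ===== VERDICT (by name: the statement is the Claim_ definition above) =====
theorem sanitize_subjects_py_spec : Claim_equal_sanitize_subjects_py := by
  intro subjects _
  unfold Spec_sanitize_subjects_py sanitize_subjects_py sanitize_subjects_py_alt
  simp only [pvTrim_foldl, List.nil_append, pvDedup_foldl, pvSieve_eq, pvA_cap]
  simp [PySem.Set.empty]
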